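-- pv_equiv track=rewrite | github.com/bradsease/astra-viso | astraviso/ephemeris.py | _extract_unique_line
-- ===== SOURCE A (Python) =====
-- class InvalidEphemerisError(Exception):
--     """ Bad ephemeris file error. """
--     pass
--
-- def _extract_unique_line(file_contents, search_string):
--     """
--     """
--
--     # Search for anchor string
--     anchor_line = [line for line in file_contents if search_string in line]
--
--     # Enforce search_string uniqueness
--     if len(anchor_line) > 1:
--         raise InvalidEphemerisError("Found multiple values for '{}'".format(
--                                     search_string))
--     elif len(anchor_line) == 0:
--         anchor_line = None
--     else:
--         return anchor_line[0]
-- ===== SOURCE B (Python) =====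
-- class InvalidEphemerisError(Exception):
--     """ Bad ephemeris file error. """
--     pass
--
-- def _extract_unique_line(file_contents, search_string):
--     for i, line in enumerate(file_contents):
--         if search_string in line:
--             if any(search_string in later for later in file_contents[i + 1:]):
--                 raise InvalidEphemerisError("Found multiple values for '{}'".format(
--                                             search_string))
--             return line
--     return None
-- ===== Notes on version B (the rewrite author's own statement) =====
-- stated objective: simpler
-- what changed: Instead of building the full list of matching lines and branching on its length, B returns immediately at the first matching line after an any() check that no later line matches; no match list is ever materialised and zero matches falls off the loop.
import Mathlib
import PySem

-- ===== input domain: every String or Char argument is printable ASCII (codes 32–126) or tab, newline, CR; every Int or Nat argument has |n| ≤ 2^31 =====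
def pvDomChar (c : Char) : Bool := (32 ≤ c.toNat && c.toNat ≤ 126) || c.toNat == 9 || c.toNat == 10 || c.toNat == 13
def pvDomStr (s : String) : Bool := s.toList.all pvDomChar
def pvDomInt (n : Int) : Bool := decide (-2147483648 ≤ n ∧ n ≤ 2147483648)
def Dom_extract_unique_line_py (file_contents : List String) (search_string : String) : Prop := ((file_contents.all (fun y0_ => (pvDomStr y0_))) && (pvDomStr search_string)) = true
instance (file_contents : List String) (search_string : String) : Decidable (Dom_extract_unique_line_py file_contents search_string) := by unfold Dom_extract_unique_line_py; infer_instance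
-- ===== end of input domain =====

-- B searches for the FIRST matching line and returns it right after an any() check that
-- no later line matches (no match list is materialised; objective: simpler). Equivalence
-- of RETURN values; on two or more matches both Pythons raise (excluded by Pre_).

-- ===== PORT A =====
def extract_unique_line_py (file_contents : List String) (search_string : String) : Option String :=
  let anchor_line := file_contents.filter (fun line => PySem.Str.isIn search_string line)
  if anchor_line.length > 1 then
    none  -- Python raises InvalidEphemerisError here; excluded by Pre_
  else if anchor_line.length = 0 then
    none
  else
    PySem.List.pyGet? anchor_line 0

-- ===== PORT B =====
-- B's early-returning for-loop, transliterated as structural recursion: at the first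
-- matching line, check the remaining suffix with any and return; else keep scanning.
def extract_unique_line_py_alt_scan (search_string : String) : List String → Option String
  | [] => none
  | line :: rest =>
    if PySem.Str.isIn search_string line then
      if rest.any (fun later => PySem.Str.isIn search_string later) then
        none  -- Python raises InvalidEphemerisError here; excluded by Pre_
      else
        some line
    else
      extract_unique_line_py_alt_scan search_string rest

def extract_unique_line_py_alt (file_contents : List String) (search_string : String) : Option String :=
  extract_unique_line_py_alt_scan search_string file_contents

-- ===== PRECONDITION & SPEC =====
-- Pre_: at most one line contains search_string; on two or more matches both A and B raise InvalidEphemerisError.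
def Pre_extract_unique_line_py (file_contents : List String) (search_string : String) : Prop :=
  file_contents.countP (fun line => PySem.Str.isIn search_string line) ≤ 1
instance (file_contents : List String) (search_string : String) : Decidable (Pre_extract_unique_line_py file_contents search_string) := by unfold Pre_extract_unique_line_py; infer_instance

def pvWitness_extract_unique_line_py : List String × String := (["abc", "def"], "bc")

def Spec_extract_unique_line_py (file_contents : List String) (search_string : String) (out : Option String) : Prop := out = extract_unique_line_py_alt file_contents search_string
instance (file_contents : List String) (search_string : String) (out : Option String) : Decidable (Spec_extract_unique_line_py file_contents search_string out) := by unfold Spec_extract_unique_line_py; infer_instance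

-- ===== CLAIM =====
def Claim_equal_extract_unique_line_py : Prop := ∀ (file_contents : List String) (search_string : String), Dom_extract_unique_line_py file_contents search_string → Pre_extract_unique_line_py file_contents search_string → Spec_extract_unique_line_py file_contents search_string (extract_unique_line_py file_contents search_string)

-- ===== LEMMAS AND PROOFS =====

theorem key_lemma (s : String) :
    ∀ (fc : List String), fc.countP (fun line => PySem.Str.isIn s line) ≤ 1 →
      extract_unique_line_py fc s = extract_unique_line_py_alt_scan s fc := by
  intro fc
  induction fc with
  | nil => intro _; rfl
  | cons l rest ih =>
    intro h
    rw [List.countP_cons] at h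
    by_cases hl : PySem.Str.isIn s l
    · rw [if_pos hl] at h
      have hrest : rest.countP (fun line => PySem.Str.isIn s line) = 0 := by omega
      have hfil : rest.filter (fun line => PySem.Str.isIn s line) = [] := by
        rw [← List.length_eq_zero_iff, ← List.countP_eq_length_filter]; exact hrest
      have hany : rest.any (fun later => PySem.Str.isIn s later) = false := by
        rw [List.any_eq_false]
        intro x hx
        have := List.countP_eq_zero.mp hrest x hx
        simpa using this
      simp only [extract_unique_line_py, extract_unique_line_py_alt_scan, hl, if_true,
        List.filter_cons, hfil, hany, if_false, Bool.false_eq_true]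
      simp [PySem.List.pyGet?, PySem.List.pyIdx?]
    · rw [if_neg hl] at h
      simp only [extract_unique_line_py, extract_unique_line_py_alt_scan, hl, if_false,
        List.filter_cons, Bool.false_eq_true]
      exact ih (by omega)

-- ===== VERDICT =====
theorem extract_unique_line_py_spec : Claim_equal_extract_unique_line_py := by
  intro fc s _ hpre
  unfold Spec_extract_unique_line_py extract_unique_line_py_alt
  exact key_lemma s fc hpre
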